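-- pv_equiv track=rewrite | github.com/MrBrantCode/unitest_baseline | mut_generate/mist_train_cf/cf_12200/solution.py | string_formatter
-- ===== SOURCE A (Python) =====
-- def string_formatter(input_string):
--     """
--     This function takes a string as input, splits it into a list of words, removes any duplicate words,
--     and returns the list of unique words in alphabetical order.
--
--     Args:
--         input_string (str): The input string that needs to be formatted.
--
--     Returns:
--         list: A list of unique words in alphabetical order.
--     """
--
--     # Split the string into a list of words
--     word_list = input_string.split()
--
--     # Initialize an empty dictionary to store unique words
--     unique_words = {}
--
--     # Iterate over each word in the list
--     for word in word_list:
--         # Remove leading and trailing punctuation marks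
--         clean_word = ''
--         for char in word:
--             if char.isalnum():
--                 clean_word += char
--
--         # Convert the word to lowercase
--         clean_word = clean_word.lower()
--
--         # Add the word to the dictionary
--         unique_words[clean_word] = True
--
--     # Convert the dictionary keys to a list and sort them
--     sorted_words = sorted(unique_words.keys())
--
--     return sorted_words
-- ===== SOURCE B (Python) =====
-- def string_formatter(input_string):
--     # Sort the full list of cleaned words (duplicates included), then collapse
--     # adjacent duplicates in one pass instead of deduplicating with a dict.
--     cleaned = sorted(
--         ''.join(ch for ch in word if ch.isalnum()).lower()
--         for word in input_string.split()
--     )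
--     result = []
--     for w in cleaned:
--         if not result or result[-1] != w:
--             result.append(w)
--     return result
-- ===== Notes on version B (the rewrite author's own statement) =====
-- stated objective: alternative
-- what changed: B cleans words with a filter+join comprehension, sorts the full list with duplicates, and dedups by collapsing adjacent equal words in one pass, instead of A's per-character accumulator loop and dict-based dedup before sorting.
import Mathlib
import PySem

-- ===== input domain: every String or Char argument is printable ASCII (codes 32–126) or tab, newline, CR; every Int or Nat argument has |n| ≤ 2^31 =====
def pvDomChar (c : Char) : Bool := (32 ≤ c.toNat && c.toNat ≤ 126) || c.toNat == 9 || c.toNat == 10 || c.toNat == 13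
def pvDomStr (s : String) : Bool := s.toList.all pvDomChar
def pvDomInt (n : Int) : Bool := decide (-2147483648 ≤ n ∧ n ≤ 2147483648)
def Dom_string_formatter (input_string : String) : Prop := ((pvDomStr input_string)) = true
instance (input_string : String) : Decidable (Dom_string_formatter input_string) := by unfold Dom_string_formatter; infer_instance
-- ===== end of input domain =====

-- B sorts the full list of cleaned words (duplicates kept) and collapses adjacent
-- duplicates in one pass, instead of A's dict-based dedup before sorting (alternative).


-- ===== PORT A =====
-- A's per-word cleaning: character loop appending alnum chars, then lower()
def cleanA (word : String) : String :=
  PySem.Str.lower (String.ofList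
    (word.toList.foldl (fun acc c => if PySem.Str.isalnum c then acc ++ [c] else acc) []))

def string_formatter (input_string : String) : List String :=
  let word_list := PySem.Str.split₀ input_string
  let unique_words :=
    word_list.foldl (fun d w => d.insert (cleanA w) true) (PySem.Dict.empty : PySem.Dict String Bool)
  PySem.List.sorted unique_words.keys (fun x => x) false

-- ===== PORT B =====
-- B's per-word cleaning: filter + join, then lower()
def cleanB (word : String) : String :=
  PySem.Str.lower (String.ofList (word.toList.filter (fun c => PySem.Str.isalnum c)))

def string_formatter_alt (input_string : String) : List String :=
  let cleaned :=
    PySem.List.sorted ((PySem.Str.split₀ input_string).map cleanB) (fun x => x) false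
  cleaned.foldl (fun res w => if res.getLast? = some w then res else res ++ [w]) []

-- ===== PRECONDITION & SPEC =====
def Spec_string_formatter (input_string : String) (out : List String) : Prop := out = string_formatter_alt input_string
instance (input_string : String) (out : List String) : Decidable (Spec_string_formatter input_string out) := by unfold Spec_string_formatter; infer_instance

-- ===== CLAIM (what is proved, stated in full; the proofs are below) =====
def Claim_equal_string_formatter : Prop := ∀ (input_string : String), Dom_string_formatter input_string → Spec_string_formatter input_string (string_formatter input_string)

-- ===== LEMMAS AND PROOFS =====

theorem cleanA_eq_cleanB : cleanA = cleanB := by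
  funext w
  unfold cleanA cleanB
  rw [PySem.List.foldl_append_if_eq_filter]
  simp

-- every member of a strictly increasing list is ≤ its last element
theorem le_getLast_of_pairwise_lt {l : List String} {m : String}
    (hp : l.Pairwise (· < ·)) (hl : l.getLast? = some m) :
    ∀ a ∈ l, a ≤ m := by
  induction l with
  | nil => simp at hl
  | cons x t ih =>
    intro a ha
    rcases List.pairwise_cons.mp hp with ⟨hx, ht⟩
    cases t with
    | nil =>
      simp at hl ha; simp [ha, hl]
    | cons y u =>
      rw [List.getLast?_cons_cons] at hl
      rcases List.mem_cons.mp ha with rfl | ha'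
      · have hm : m ∈ y :: u := List.mem_of_getLast? hl
        exact le_of_lt (hx m hm)
      · exact ih ht hl a ha'

-- invariant of B's adjacent-collapse fold over a weakly increasing list
theorem collapse_inv (ys : List String) :
    ∀ (acc : List String), acc.Pairwise (· < ·) → ys.Pairwise (· ≤ ·) →
    (∀ y ∈ ys, ∀ a ∈ acc, a ≤ y) →
    ((ys.foldl (fun res w => if res.getLast? = some w then res else res ++ [w]) acc).Pairwise (· < ·)
      ∧ ∀ x, x ∈ ys.foldl (fun res w => if res.getLast? = some w then res else res ++ [w]) acc
              ↔ x ∈ acc ∨ x ∈ ys) := by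
  induction ys with
  | nil => intro acc h1 _ _; simpa using h1
  | cons y t ih =>
    intro acc h1 h2 h3
    rcases List.pairwise_cons.mp h2 with ⟨hy, ht⟩
    simp only [List.foldl_cons]
    by_cases hl : acc.getLast? = some y
    · rw [if_pos hl]
      have hb : ∀ z ∈ t, ∀ a ∈ acc, a ≤ z := fun z hz a ha => h3 z (List.mem_cons_of_mem _ hz) a ha
      rcases ih acc h1 ht hb with ⟨hp, hm⟩
      refine ⟨hp, fun x => ?_⟩
      rw [hm x]
      have hyacc : y ∈ acc := List.mem_of_getLast? hl
      constructor
      · rintro (h | h)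
        · exact Or.inl h
        · exact Or.inr (List.mem_cons_of_mem _ h)
      · rintro (h | h)
        · exact Or.inl h
        · rcases List.mem_cons.mp h with rfl | h'
          · exact Or.inl hyacc
          · exact Or.inr h'
    · rw [if_neg hl]
      have hlt : ∀ a ∈ acc, a < y := by
        intro a ha
        have hle : a ≤ y := h3 y (List.mem_cons_self) a ha
        rcases lt_or_eq_of_le hle with h | rfl
        · exact h
        · obtain ⟨m, hm⟩ : ∃ m, acc.getLast? = some m := by
            cases hacc : acc.getLast? with
            | none => rw [List.getLast?_eq_none_iff] at hacc; subst hacc; simp at ha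
            | some m => exact ⟨m, rfl⟩
          have h1' : a ≤ m := le_getLast_of_pairwise_lt h1 hm a ha
          have h2' : m ≤ a := h3 a List.mem_cons_self m (List.mem_of_getLast? hm)
          have : m = a := le_antisymm h2' h1'
          exact absurd (this ▸ hm) hl
      have hp' : (acc ++ [y]).Pairwise (· < ·) := by
        rw [List.pairwise_append]
        exact ⟨h1, List.pairwise_singleton _ _, by simpa using hlt⟩
      have hb : ∀ z ∈ t, ∀ a ∈ acc ++ [y], a ≤ z := by
        intro z hz a ha
        rcases List.mem_append.mp ha with h | h
        · exact h3 z (List.mem_cons_of_mem _ hz) a h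
        · simp at h; subst h; exact hy z hz
      rcases ih (acc ++ [y]) hp' ht hb with ⟨hp, hm⟩
      refine ⟨hp, fun x => ?_⟩
      rw [hm x]
      simp only [List.mem_append, List.mem_cons]
      tauto

-- sorted(set(l)) equals the adjacent-collapse of sorted(l)
theorem sorted_ofList_eq_collapse (l : List String) :
    PySem.List.sorted (PySem.Set.ofList l) (fun x => x) false =
      (PySem.List.sorted l (fun x => x) false).foldl
        (fun res w => if res.getLast? = some w then res else res ++ [w]) [] := by
  set ys := PySem.List.sorted l (fun x => x) false with hys
  have hpair : ys.Pairwise (· ≤ ·) := PySem.List.sorted_pairwise l (fun x => x)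
  rcases collapse_inv ys [] List.Pairwise.nil hpair (by simp) with ⟨hp, hm⟩
  set r := ys.foldl (fun res w => if res.getLast? = some w then res else res ++ [w]) []
  have hmem : ∀ x, x ∈ r ↔ x ∈ PySem.Set.ofList l := by
    intro x
    rw [hm x, PySem.Set.mem_ofList]
    simp [hys, PySem.List.mem_sorted]
  have hnd : r.Nodup := hp.imp (fun h => ne_of_lt h)
  have hperm : r.Perm (PySem.Set.ofList l) :=
    (List.perm_ext_iff_of_nodup hnd (PySem.Set.nodup_ofList l)).mpr hmem
  exact PySem.List.sorted_eq_of_perm_of_pairwise_lt _ r (fun x => x) hperm hp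

-- ===== VERDICT (by name: the statement is the Claim_ definition above) =====
theorem string_formatter_spec : Claim_equal_string_formatter := by
  intro s _
  unfold Spec_string_formatter string_formatter string_formatter_alt
  simp only
  rw [PySem.Dict.keys_foldl_insert_key, PySem.Dict.keys_empty,
    PySem.Set.update_nil_left, cleanA_eq_cleanB]
  exact sorted_ofList_eq_collapse _
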